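-- pv_equiv track=rewrite | github.com/leanfried/embedded3DPvids | py/file_handling.py | isVidStill
-- ===== SOURCE A (Python) =====
-- def singleLineStN() -> list:
--     '''get a list of single line stitch names'''
--     return ['horizfull', 'vert1', 'vert2', 'vert3', 'vert4', 'xs1', 'xs2', 'xs3', 'xs4', 'xs5', 'horiz0', 'horiz1', 'horiz2']
--
-- def isVidStill(file:str) ->bool:
--     '''determine if the file is a video still'''
--     if not '.png' in file:
--         return False
--     if '_vstill_' in file:
--         return True
--     for st in singleLineStN():
--         if f'_vid_{st}' in file:
--             return True
--     return False
-- ===== SOURCE B (Python) =====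
-- def _stitch(t: str) -> bool:
--     '''decision tree (prefix trie) over the 13 single-line stitch names'''
--     if t.startswith('horiz'):
--         r = t[5:6]
--         return t.startswith('full', 5) or r in ('0', '1', '2')
--     if t.startswith('vert'):
--         return t[4:5] in ('1', '2', '3', '4')
--     if t.startswith('xs'):
--         return t[2:3] in ('1', '2', '3', '4', '5')
--     return False
--
-- def isVidStill(file: str) -> bool:
--     '''determine if the file is a video still'''
--     if '.png' not in file:
--         return False
--     if '_vstill_' in file:
--         return True
--     s = file
--     while True:
--         k = s.find('_vid_')
--         if k == -1:
--             return False
--         if _stitch(s[k + 5:]):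
--             return True
--         s = s[k + 1:]
-- ===== Notes on version B (the rewrite author's own statement) =====
-- stated objective: alternative
-- what changed: Instead of 13 whole-string substring scans (one per stitch name), B runs a find-driven loop that jumps from one occurrence of the video marker to the next and classifies the text after it with a hand-built decision tree (prefix trie: horiz/vert/xs branches plus one trailing character), so no stitch-name list is scanned at all.
import Mathlib
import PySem

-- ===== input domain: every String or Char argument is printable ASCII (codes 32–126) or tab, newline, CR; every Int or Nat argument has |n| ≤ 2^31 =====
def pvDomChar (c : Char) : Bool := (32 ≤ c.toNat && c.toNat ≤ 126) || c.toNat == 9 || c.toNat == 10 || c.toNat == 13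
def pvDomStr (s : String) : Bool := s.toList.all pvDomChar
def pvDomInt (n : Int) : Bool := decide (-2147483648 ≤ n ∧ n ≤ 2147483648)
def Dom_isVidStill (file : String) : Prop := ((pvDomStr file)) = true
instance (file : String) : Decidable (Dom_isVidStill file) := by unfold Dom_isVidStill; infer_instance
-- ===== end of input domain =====

-- B replaces A's 13 per-name substring scans by a find-driven loop over occurrences of the
-- video marker with a hand-built decision tree over the stitch names; objective: alternative.

-- ===== PORT A =====
-- helper: singleLineStN() from the same module
def singleLineStN : List String :=
  ["horizfull", "vert1", "vert2", "vert3", "vert4", "xs1", "xs2", "xs3", "xs4", "xs5",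
   "horiz0", "horiz1", "horiz2"]

def isVidStill (file : String) : Bool :=
  if !(PySem.Str.isIn ".png" file) then false
  else if PySem.Str.isIn "_vstill_" file then true
  else
    -- for st in singleLineStN(): if f'_vid_{st}' in file: return True / return False
    singleLineStN.any (fun st => PySem.Str.isIn ("_vid_" ++ st) file)

-- ===== PORT B =====
-- _stitch(t): decision tree over the 13 stitch names; t[5:6] ported as (t.drop 5).take 1
-- (exact for these nonnegative literal bounds), tuple membership as the equality tests it performs.
def stitch (t : List Char) : Bool :=
  if "horiz".toList.isPrefixOf t then
    let r := (t.drop 5).take 1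
    "full".toList.isPrefixOf (t.drop 5) || r == ['0'] || r == ['1'] || r == ['2']
  else if "vert".toList.isPrefixOf t then
    let r := (t.drop 4).take 1
    r == ['1'] || r == ['2'] || r == ['3'] || r == ['4']
  else if "xs".toList.isPrefixOf t then
    let r := (t.drop 2).take 1
    r == ['1'] || r == ['2'] || r == ['3'] || r == ['4'] || r == ['5']
  else false

-- the while loop: k = s.find('_vid_'); stop on -1, test _stitch(s[k+5:]), continue on s[k+1:]
def vidLoop (s : List Char) : Bool :=
  let k := PySem.Chars.find s "_vid_".toList
  if h : k = -1 then false
  else if stitch (s.drop (k.toNat + 5)) then true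
  else vidLoop (s.drop (k.toNat + 1))
termination_by s.length
decreasing_by
  have hin : ("_vid_".toList : List Char) <:+: s := (PySem.Chars.find_ne_neg_one_iff s _).mp h
  have := hin.length_le
  simp at this ⊢
  omega

def isVidStill_alt (file : String) : Bool :=
  if !(PySem.Str.isIn ".png" file) then false
  else if PySem.Str.isIn "_vstill_" file then true
  else vidLoop file.toList

-- ===== PRECONDITION & SPEC =====
def Spec_isVidStill (file : String) (out : Bool) : Prop := out = isVidStill_alt file
instance (file : String) (out : Bool) : Decidable (Spec_isVidStill file out) := by unfold Spec_isVidStill; infer_instance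

-- ===== CLAIM (what is proved, stated in full; the proofs are below) =====
def Claim_equal_isVidStill : Prop := ∀ (file : String), Dom_isVidStill file → Spec_isVidStill file (isVidStill file)

-- ===== LEMMAS AND PROOFS =====

theorem append_prefix_iff (a b l : List Char) :
    (a ++ b) <+: l ↔ a <+: l ∧ b <+: l.drop a.length := by
  constructor
  · rintro ⟨t, rfl⟩
    refine ⟨⟨b ++ t, by simp⟩, ?_⟩
    simp
  · rintro ⟨ha, hb⟩
    obtain ⟨t, rfl⟩ := ha
    simp at hb
    obtain ⟨u, hu⟩ := hb
    exact ⟨u, by simp [hu]⟩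

theorem take_one_of_prefix {p t : List Char} (h : p <+: t) (hp : p ≠ []) :
    t.take 1 = p.take 1 := by
  obtain ⟨u, rfl⟩ := h
  cases p with
  | nil => exact absurd rfl hp
  | cons c cs => simp

theorem single_prefix_iff (c : Char) (l : List Char) :
    [c] <+: l ↔ l.take 1 = [c] := by
  cases l with
  | nil => simp
  | cons x xs => simp [List.cons_prefix_cons, eq_comm]



theorem br1 (H V X F a0 a1 a2 b1 b2 b3 b4 c1 c2 c3 c4 c5 : Prop)
    (hH : H) (hHV : ¬(H ∧ V)) (hHX : ¬(H ∧ X)) :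
    (((F ∨ a0) ∨ a1) ∨ a2) ↔
      (H ∧ F ∨ V ∧ b1 ∨ V ∧ b2 ∨ V ∧ b3 ∨ V ∧ b4 ∨ X ∧ c1 ∨ X ∧ c2 ∨ X ∧ c3 ∨ X ∧ c4 ∨
        X ∧ c5 ∨ H ∧ a0 ∨ H ∧ a1 ∨ H ∧ a2) := by
  constructor
  · rintro (((h | h) | h) | h)
    · exact Or.inl ⟨hH, h⟩
    · exact Or.inr (Or.inr (Or.inr (Or.inr (Or.inr (Or.inr (Or.inr (Or.inr (Or.inr (Or.inr (Or.inl ⟨hH, h⟩))))))))))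
    · exact Or.inr (Or.inr (Or.inr (Or.inr (Or.inr (Or.inr (Or.inr (Or.inr (Or.inr (Or.inr (Or.inr (Or.inl ⟨hH, h⟩)))))))))))
    · exact Or.inr (Or.inr (Or.inr (Or.inr (Or.inr (Or.inr (Or.inr (Or.inr (Or.inr (Or.inr (Or.inr (Or.inr (⟨hH, h⟩))))))))))))
  · rintro (⟨_, h⟩ | ⟨hv, _⟩ | ⟨hv, _⟩ | ⟨hv, _⟩ | ⟨hv, _⟩ | ⟨hx, _⟩ | ⟨hx, _⟩ | ⟨hx, _⟩ | ⟨hx, _⟩ | ⟨hx, _⟩ | ⟨_, h⟩ | ⟨_, h⟩ | ⟨_, h⟩)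
    · exact Or.inl (Or.inl (Or.inl h))
    · exact absurd ⟨hH, hv⟩ hHV
    · exact absurd ⟨hH, hv⟩ hHV
    · exact absurd ⟨hH, hv⟩ hHV
    · exact absurd ⟨hH, hv⟩ hHV
    · exact absurd ⟨hH, hx⟩ hHX
    · exact absurd ⟨hH, hx⟩ hHX
    · exact absurd ⟨hH, hx⟩ hHX
    · exact absurd ⟨hH, hx⟩ hHX
    · exact absurd ⟨hH, hx⟩ hHX
    · exact Or.inl (Or.inl (Or.inr h))
    · exact Or.inl (Or.inr h)
    · exact Or.inr h

theorem br2 (H V X F a0 a1 a2 b1 b2 b3 b4 c1 c2 c3 c4 c5 : Prop)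
    (hH : ¬H) (hV : V) (hVX : ¬(V ∧ X)) :
    (((b1 ∨ b2) ∨ b3) ∨ b4) ↔
      (H ∧ F ∨ V ∧ b1 ∨ V ∧ b2 ∨ V ∧ b3 ∨ V ∧ b4 ∨ X ∧ c1 ∨ X ∧ c2 ∨ X ∧ c3 ∨ X ∧ c4 ∨
        X ∧ c5 ∨ H ∧ a0 ∨ H ∧ a1 ∨ H ∧ a2) := by
  constructor
  · rintro (((h | h) | h) | h)
    · exact Or.inr (Or.inl ⟨hV, h⟩)
    · exact Or.inr (Or.inr (Or.inl ⟨hV, h⟩))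
    · exact Or.inr (Or.inr (Or.inr (Or.inl ⟨hV, h⟩)))
    · exact Or.inr (Or.inr (Or.inr (Or.inr (Or.inl ⟨hV, h⟩))))
  · rintro (⟨hh, _⟩ | ⟨_, h⟩ | ⟨_, h⟩ | ⟨_, h⟩ | ⟨_, h⟩ | ⟨hx, _⟩ | ⟨hx, _⟩ | ⟨hx, _⟩ | ⟨hx, _⟩ | ⟨hx, _⟩ | ⟨hh, _⟩ | ⟨hh, _⟩ | ⟨hh, _⟩)
    · exact absurd hh hH
    · exact Or.inl (Or.inl (Or.inl h))
    · exact Or.inl (Or.inl (Or.inr h))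
    · exact Or.inl (Or.inr h)
    · exact Or.inr h
    · exact absurd ⟨hV, hx⟩ hVX
    · exact absurd ⟨hV, hx⟩ hVX
    · exact absurd ⟨hV, hx⟩ hVX
    · exact absurd ⟨hV, hx⟩ hVX
    · exact absurd ⟨hV, hx⟩ hVX
    · exact absurd hh hH
    · exact absurd hh hH
    · exact absurd hh hH

theorem br3 (H V X F a0 a1 a2 b1 b2 b3 b4 c1 c2 c3 c4 c5 : Prop)
    (hH : ¬H) (hV : ¬V) (hX : X) :
    ((((c1 ∨ c2) ∨ c3) ∨ c4) ∨ c5) ↔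
      (H ∧ F ∨ V ∧ b1 ∨ V ∧ b2 ∨ V ∧ b3 ∨ V ∧ b4 ∨ X ∧ c1 ∨ X ∧ c2 ∨ X ∧ c3 ∨ X ∧ c4 ∨
        X ∧ c5 ∨ H ∧ a0 ∨ H ∧ a1 ∨ H ∧ a2) := by
  constructor
  · rintro ((((h | h) | h) | h) | h)
    · exact Or.inr (Or.inr (Or.inr (Or.inr (Or.inr (Or.inl ⟨hX, h⟩)))))
    · exact Or.inr (Or.inr (Or.inr (Or.inr (Or.inr (Or.inr (Or.inl ⟨hX, h⟩))))))
    · exact Or.inr (Or.inr (Or.inr (Or.inr (Or.inr (Or.inr (Or.inr (Or.inl ⟨hX, h⟩)))))))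
    · exact Or.inr (Or.inr (Or.inr (Or.inr (Or.inr (Or.inr (Or.inr (Or.inr (Or.inl ⟨hX, h⟩))))))))
    · exact Or.inr (Or.inr (Or.inr (Or.inr (Or.inr (Or.inr (Or.inr (Or.inr (Or.inr (Or.inl ⟨hX, h⟩)))))))))
  · rintro (⟨hh, _⟩ | ⟨hv, _⟩ | ⟨hv, _⟩ | ⟨hv, _⟩ | ⟨hv, _⟩ | ⟨_, h⟩ | ⟨_, h⟩ | ⟨_, h⟩ | ⟨_, h⟩ | ⟨_, h⟩ | ⟨hh, _⟩ | ⟨hh, _⟩ | ⟨hh, _⟩)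
    · exact absurd hh hH
    · exact absurd hv hV
    · exact absurd hv hV
    · exact absurd hv hV
    · exact absurd hv hV
    · exact Or.inl (Or.inl (Or.inl (Or.inl h)))
    · exact Or.inl (Or.inl (Or.inl (Or.inr h)))
    · exact Or.inl (Or.inl (Or.inr h))
    · exact Or.inl (Or.inr h)
    · exact Or.inr h
    · exact absurd hh hH
    · exact absurd hh hH
    · exact absurd hh hH

theorem br4 (H V X F a0 a1 a2 b1 b2 b3 b4 c1 c2 c3 c4 c5 : Prop)
    (hH : ¬H) (hV : ¬V) (hX : ¬X) :
    False ↔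
      (H ∧ F ∨ V ∧ b1 ∨ V ∧ b2 ∨ V ∧ b3 ∨ V ∧ b4 ∨ X ∧ c1 ∨ X ∧ c2 ∨ X ∧ c3 ∨ X ∧ c4 ∨
        X ∧ c5 ∨ H ∧ a0 ∨ H ∧ a1 ∨ H ∧ a2) := by
  constructor
  · exact False.elim
  · rintro (⟨hh, _⟩ | ⟨hv, _⟩ | ⟨hv, _⟩ | ⟨hv, _⟩ | ⟨hv, _⟩ | ⟨hx, _⟩ | ⟨hx, _⟩ | ⟨hx, _⟩ | ⟨hx, _⟩ | ⟨hx, _⟩ | ⟨hh, _⟩ | ⟨hh, _⟩ | ⟨hh, _⟩)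
    · exact absurd hh hH
    · exact absurd hv hV
    · exact absurd hv hV
    · exact absurd hv hV
    · exact absurd hv hV
    · exact absurd hx hX
    · exact absurd hx hX
    · exact absurd hx hX
    · exact absurd hx hX
    · exact absurd hx hX
    · exact absurd hh hH
    · exact absurd hh hH
    · exact absurd hh hH

-- the decision tree matches exactly the 13 stitch names
theorem stitch_eq (t : List Char) :
    stitch t = singleLineStN.any (fun st => st.toList.isPrefixOf t) := by
  have hHV : ¬("horiz".toList <+: t ∧ "vert".toList <+: t) := by
    rintro ⟨h1, h2⟩
    have a := take_one_of_prefix h1 (by decide)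
    have b := take_one_of_prefix h2 (by decide)
    rw [a] at b
    exact absurd b (by decide)
  have hHX : ¬("horiz".toList <+: t ∧ "xs".toList <+: t) := by
    rintro ⟨h1, h2⟩
    have a := take_one_of_prefix h1 (by decide)
    have b := take_one_of_prefix h2 (by decide)
    rw [a] at b
    exact absurd b (by decide)
  have hVX : ¬("vert".toList <+: t ∧ "xs".toList <+: t) := by
    rintro ⟨h1, h2⟩
    have a := take_one_of_prefix h1 (by decide)
    have b := take_one_of_prefix h2 (by decide)
    rw [a] at b
    exact absurd b (by decide)
  have eHF : ("horizfull".toList <+: t) ↔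
      ("horiz".toList <+: t ∧ "full".toList <+: t.drop 5) := by
    rw [show "horizfull".toList = "horiz".toList ++ "full".toList from by decide,
      append_prefix_iff, show ("horiz".toList).length = 5 from by decide]
  have eH : ∀ c : Char, ("horiz".toList ++ [c]) <+: t ↔
      ("horiz".toList <+: t ∧ (t.drop 5).take 1 = [c]) := by
    intro c
    rw [append_prefix_iff, show ("horiz".toList).length = 5 from by decide, single_prefix_iff]
  have eV : ∀ c : Char, ("vert".toList ++ [c]) <+: t ↔
      ("vert".toList <+: t ∧ (t.drop 4).take 1 = [c]) := by
    intro c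
    rw [append_prefix_iff, show ("vert".toList).length = 4 from by decide, single_prefix_iff]
  have eX : ∀ c : Char, ("xs".toList ++ [c]) <+: t ↔
      ("xs".toList <+: t ∧ (t.drop 2).take 1 = [c]) := by
    intro c
    rw [append_prefix_iff, show ("xs".toList).length = 2 from by decide, single_prefix_iff]
  rw [Bool.eq_iff_iff]
  unfold stitch
  simp only [singleLineStN, List.any_cons, List.any_nil, Bool.or_eq_true,
    List.isPrefixOf_iff_prefix, Bool.false_eq_true, or_false]
  simp only [eHF, show "vert1".toList = "vert".toList ++ ['1'] from by decide,
    show "vert2".toList = "vert".toList ++ ['2'] from by decide,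
    show "vert3".toList = "vert".toList ++ ['3'] from by decide,
    show "vert4".toList = "vert".toList ++ ['4'] from by decide,
    show "xs1".toList = "xs".toList ++ ['1'] from by decide,
    show "xs2".toList = "xs".toList ++ ['2'] from by decide,
    show "xs3".toList = "xs".toList ++ ['3'] from by decide,
    show "xs4".toList = "xs".toList ++ ['4'] from by decide,
    show "xs5".toList = "xs".toList ++ ['5'] from by decide,
    show "horiz0".toList = "horiz".toList ++ ['0'] from by decide,
    show "horiz1".toList = "horiz".toList ++ ['1'] from by decide,
    show "horiz2".toList = "horiz".toList ++ ['2'] from by decide,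
    eV, eX, eH]
  split_ifs with hH hV hX
  · simp only [Bool.or_eq_true, beq_iff_eq, List.isPrefixOf_iff_prefix]
    exact br1 _ _ _ _ _ _ _ _ _ _ _ _ _ _ _ _ hH hHV hHX
  · simp only [Bool.or_eq_true, beq_iff_eq]
    exact br2 _ _ _ ("full".toList <+: List.drop 5 t) _ _ _ _ _ _ _ _ _ _ _ _ hH hV hVX
  · simp only [Bool.or_eq_true, beq_iff_eq]
    exact br3 _ _ _ ("full".toList <+: List.drop 5 t) _ _ _ _ _ _ _ _ _ _ _ _ hH hV hX
  · simp only [false_iff]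
    rw [← false_iff]
    exact br4 _ _ _ ("full".toList <+: List.drop 5 t) _ _ _ _ _ _ _ _ _ _ _ _ hH hV hX


-- the find loop returns true iff some '_vid_' occurrence is followed by a stitch name
theorem vidLoop_iff (s : List Char) :
    vidLoop s = true ↔ ∃ j, "_vid_".toList <+: s.drop j ∧
      singleLineStN.any (fun st => st.toList.isPrefixOf (s.drop (j + 5))) = true := by
  suffices H : ∀ (n : Nat) (s : List Char), s.length ≤ n →
      (vidLoop s = true ↔ ∃ j, "_vid_".toList <+: s.drop j ∧
        singleLineStN.any (fun st => st.toList.isPrefixOf (s.drop (j + 5))) = true) from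
    H s.length s le_rfl
  intro n
  induction n with
  | zero =>
    intro s hs
    have hs0 : s = [] := List.eq_nil_of_length_eq_zero (Nat.le_zero.mp hs)
    subst hs0
    rw [vidLoop]
    have hk : PySem.Chars.find ([] : List Char) "_vid_".toList = -1 := by
      rw [PySem.Chars.find_eq_neg_one_iff]
      simp
    rw [dif_pos hk]
    constructor
    · intro h; exact absurd h (by simp)
    · rintro ⟨j, h1, -⟩
      simp at h1
  | succ n ih =>
    intro s hs
    rw [vidLoop]
    by_cases hk : PySem.Chars.find s "_vid_".toList = -1
    · rw [dif_pos hk]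
      constructor
      · intro h; exact absurd h (by simp)
      · rintro ⟨j, h1, -⟩
        rw [PySem.Chars.find_eq_neg_one_iff] at hk
        exact absurd (h1.isInfix.trans (s.drop_suffix j).isInfix) hk
    · rw [dif_neg hk]
      have hk0 : 0 ≤ PySem.Chars.find s "_vid_".toList := by
        have := PySem.Chars.neg_one_le_find s "_vid_".toList
        omega
      obtain ⟨hocc, hmin⟩ := PySem.Chars.find_spec hk0
      set k := (PySem.Chars.find s "_vid_".toList).toNat with hkdef
      have hlen5 : k + 5 ≤ s.length := by
        have h5 := hocc.length_le
        simp only [List.length_drop] at h5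
        have : ("_vid_".toList).length = 5 := by decide
        omega
      by_cases hst : stitch (s.drop (k + 5)) = true
      · rw [if_pos hst]
        constructor
        · intro _
          exact ⟨k, hocc, by rw [← stitch_eq]; exact hst⟩
        · intro _
          rfl
      · rw [if_neg hst]
        rw [ih (s.drop (k + 1)) (by simp only [List.length_drop]; omega)]
        constructor
        · rintro ⟨j, h1, h2⟩
          refine ⟨k + 1 + j, ?_, ?_⟩
          · rw [show s.drop (k + 1 + j) = (s.drop (k + 1)).drop j from by
              rw [List.drop_drop]]
            exact h1
          · rw [show s.drop (k + 1 + j + 5) = (s.drop (k + 1)).drop (j + 5) from by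
              rw [List.drop_drop]; rfl]
            exact h2
        · rintro ⟨j, h1, h2⟩
          have hjk : k ≤ j := by
            by_contra h
            exact hmin j (by omega) h1
          have hjne : j ≠ k := by
            rintro rfl
            rw [← stitch_eq] at h2
            exact hst h2
          refine ⟨j - (k + 1), ?_, ?_⟩
          · rw [show (s.drop (k + 1)).drop (j - (k + 1)) = s.drop j from by
              rw [List.drop_drop]; congr 1; omega]
            exact h1
          · rw [show (s.drop (k + 1)).drop (j - (k + 1) + 5) = s.drop (j + 5) from by
              rw [List.drop_drop]; congr 1; omega]
            exact h2

-- A's 13 substring scans = B's find loop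
theorem scans_eq (file : String) :
    singleLineStN.any (fun st => PySem.Str.isIn ("_vid_" ++ st) file) = vidLoop file.toList := by
  rw [Bool.eq_iff_iff, vidLoop_iff]
  simp only [List.any_eq_true, List.isPrefixOf_iff_prefix,
    PySem.Str.isIn_eq, String.toList_append]
  constructor
  · rintro ⟨st, hst, hin⟩
    obtain ⟨j, hj⟩ := (PySem.Chars.exists_prefix_drop_iff_isIn _ _).mpr hin
    rw [append_prefix_iff] at hj
    obtain ⟨h5, hrest⟩ := hj
    exact ⟨j, h5, st, hst, by simpa [List.drop_drop, Nat.add_comm] using hrest⟩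
  · rintro ⟨j, h5, st, hst, hrest⟩
    refine ⟨st, hst, (PySem.Chars.exists_prefix_drop_iff_isIn _ _).mp ⟨j, ?_⟩⟩
    rw [append_prefix_iff]
    exact ⟨h5, by simpa [List.drop_drop, Nat.add_comm] using hrest⟩

-- ===== VERDICT (by name: the statement is the Claim_ definition above) =====
theorem isVidStill_spec : Claim_equal_isVidStill := by
  intro file _
  unfold Spec_isVidStill isVidStill isVidStill_alt
  rw [scans_eq]
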